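-- pv_equiv track=rewrite | github.com/Aasthaengg/IBMdataset | Python_codes/p03088/s024734380.py | isOK
-- ===== SOURCE A (Python) =====
-- def isOK(last3, s):
--     for i in range(len(last3 + s)):
--         t = list(last3 + s)
--         if i >= 1:
--             t[i], t[i - 1] = t[i - 1], t[i]
--         if ''.join(t).count('AGC'):
--             return False
--     return True
-- ===== SOURCE B (Python) =====
-- def isOK(last3, s):
--     # O(n): 'AGC' can only be created (or already exist) within a constant-size
--     # window around each swapped pair, so check windows instead of rescanning.
--     u = last3 + s
--     if 'AGC' in u:
--         return False
--     for i in range(1, len(u)):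
--         lo = max(0, i - 3)
--         w = list(u[lo:i + 3])
--         j = i - lo
--         w[j], w[j - 1] = w[j - 1], w[j]
--         if 'AGC' in ''.join(w):
--             return False
--     return True
-- ===== Notes on version B (the rewrite author's own statement) =====
-- stated objective: faster
-- what changed: A rebuilds the whole string and rescans all of it for 'AGC' after every adjacent swap; B checks the original string once and then only a constant-size (<=6 chars) window around each swapped pair.
import Mathlib
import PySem

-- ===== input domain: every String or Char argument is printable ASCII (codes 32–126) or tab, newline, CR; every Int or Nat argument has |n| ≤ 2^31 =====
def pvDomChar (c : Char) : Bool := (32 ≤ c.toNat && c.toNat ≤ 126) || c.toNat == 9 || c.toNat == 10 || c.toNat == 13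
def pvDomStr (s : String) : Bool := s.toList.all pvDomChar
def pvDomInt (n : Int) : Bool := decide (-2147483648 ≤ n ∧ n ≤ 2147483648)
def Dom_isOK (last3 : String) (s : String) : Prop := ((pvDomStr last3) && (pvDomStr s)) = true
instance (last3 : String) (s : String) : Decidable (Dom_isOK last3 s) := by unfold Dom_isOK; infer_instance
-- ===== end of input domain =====

-- B replaces A's full rescan of the whole swapped string at every position by a
-- constant-size window check around each swapped pair (plus one direct substring check).

-- ===== PORT A =====
-- t[i], t[i-1] = t[i-1], t[i]  (indices are in range when used, so getD's default is never read)
def pvSwapA (u : List Char) (i : Nat) : List Char :=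
  (u.set i (u.getD (i - 1) ' ')).set (i - 1) (u.getD i ' ')

-- the 'for i in range(len(last3+s))' loop with its early 'return False'
def pvALoop (u : List Char) : List Nat → Bool
  | [] => true
  | i :: rest =>
    let t := if 1 ≤ i then pvSwapA u i else u
    -- if ''.join(t).count('AGC'):
    if PySem.Chars.count t ['A', 'G', 'C'] ≠ 0 then false else pvALoop u rest

def isOK (last3 : String) (s : String) : Bool :=
  -- list(last3 + s) : the concatenation of the code-point lists
  let u := last3.toList ++ s.toList
  pvALoop u (List.range u.length)

-- ===== PORT B =====
-- the 'for i in range(1, len(u))' loop of Source B with its early 'return False';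
-- u[lo:i+3] with 0 ≤ lo ≤ i+3 is (u.drop lo).take (i+3-lo)  (PySem.List.slice_natCast)
def pvBLoop (u : List Char) : List Nat → Bool
  | [] => true
  | i :: rest =>
    let lo := i - 3                                -- max(0, i - 3)  (Nat sub truncates)
    let w0 := (u.drop lo).take (i + 3 - lo)        -- list(u[lo:i+3])
    let j := i - lo
    -- w[j], w[j-1] = w[j-1], w[j]  (indices in range, so getD's default is never read)
    let w := (w0.set j (w0.getD (j - 1) ' ')).set (j - 1) (w0.getD j ' ')
    if PySem.Chars.isIn ['A', 'G', 'C'] w then false else pvBLoop u rest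

def isOK_alt (last3 : String) (s : String) : Bool :=
  let u := last3.toList ++ s.toList
  if PySem.Chars.isIn ['A', 'G', 'C'] u then false
  else pvBLoop u (List.range' 1 (u.length - 1))    -- range(1, len(u))

-- ===== PRECONDITION & SPEC =====
def Spec_isOK (last3 : String) (s : String) (out : Bool) : Prop := out = isOK_alt last3 s
instance (last3 : String) (s : String) (out : Bool) : Decidable (Spec_isOK last3 s out) := by unfold Spec_isOK; infer_instance

-- ===== CLAIM (what is proved, stated in full; the proofs are below) =====
def Claim_equal_isOK : Prop := ∀ (last3 : String) (s : String), Dom_isOK last3 s → Spec_isOK last3 s (isOK last3 s)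

-- ===== LEMMAS AND PROOFS =====

-- 'AGC' occurs in u starting at index j
def pvOccAt (u : List Char) (j : Nat) : Prop :=
  j + 2 < u.length ∧ u.getD j ' ' = 'A' ∧ u.getD (j + 1) ' ' = 'G' ∧ u.getD (j + 2) ' ' = 'C'

def pvOcc (u : List Char) : Prop := ∃ j, pvOccAt u j

lemma pvPrefix3_iff (x : List Char) :
    ['A', 'G', 'C'] <+: x ↔
      2 < x.length ∧ x.getD 0 ' ' = 'A' ∧ x.getD 1 ' ' = 'G' ∧ x.getD 2 ' ' = 'C' := by
  match x with
  | [] => simp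
  | [a] => simp [List.cons_prefix_cons]
  | [a, b] => simp [List.cons_prefix_cons]
  | a :: b :: c :: t =>
    simp [List.cons_prefix_cons, List.getD]
    constructor
    · rintro ⟨rfl, rfl, rfl⟩; exact ⟨rfl, rfl, rfl⟩
    · rintro ⟨rfl, rfl, rfl⟩; exact ⟨rfl, rfl, rfl⟩

lemma pvOccAt_iff_prefix_drop (u : List Char) (j : Nat) :
    pvOccAt u j ↔ ['A', 'G', 'C'] <+: u.drop j := by
  rw [pvPrefix3_iff]
  simp only [pvOccAt, List.getD_eq_getElem?_getD, List.getElem?_drop, List.length_drop,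
    Nat.add_zero]
  constructor
  · rintro ⟨h1, h2⟩; exact ⟨by omega, h2⟩
  · rintro ⟨h1, h2⟩; exact ⟨by omega, h2⟩

lemma pvOcc_iff_isIn (u : List Char) :
    pvOcc u ↔ PySem.Chars.isIn ['A', 'G', 'C'] u = true := by
  rw [← PySem.Chars.exists_prefix_drop_iff_isIn]
  exact exists_congr (fun j => pvOccAt_iff_prefix_drop u j)

lemma pvGo_ge (sub : List Char) : ∀ (fuel : Nat) (l : List Char) (acc : Nat),
    acc ≤ PySem.Chars.count.go sub fuel l acc := by
  intro fuel
  induction fuel with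
  | zero => intro l acc; cases l <;> simp [PySem.Chars.count.go]
  | succ n ih =>
    intro l acc
    cases l with
    | nil => simp [PySem.Chars.count.go]
    | cons h t =>
      show acc ≤ (if sub.isPrefixOf (h :: t) then
          PySem.Chars.count.go sub n (List.drop sub.length (h :: t)) (acc + 1)
        else PySem.Chars.count.go sub n t acc)
      split
      · exact le_trans (Nat.le_succ acc) (ih _ _)
      · exact ih _ _

lemma pvGo_eq_acc_iff (sub : List Char) (hs : sub ≠ []) :
    ∀ (fuel : Nat) (l : List Char), l.length ≤ fuel → ∀ acc,
      (PySem.Chars.count.go sub fuel l acc = acc ↔ ¬ ∃ j, sub <+: l.drop j) := by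
  intro fuel
  induction fuel with
  | zero =>
    intro l hl acc
    have : l = [] := List.eq_nil_of_length_eq_zero (Nat.le_zero.mp hl)
    subst this
    simp [PySem.Chars.count.go, List.prefix_nil, hs]
  | succ n ih =>
    intro l hl acc
    cases l with
    | nil => simp [PySem.Chars.count.go, List.prefix_nil, hs]
    | cons h t =>
      show (if sub.isPrefixOf (h :: t) then
          PySem.Chars.count.go sub n (List.drop sub.length (h :: t)) (acc + 1)
        else PySem.Chars.count.go sub n t acc) = acc ↔ _
      by_cases hp : sub.isPrefixOf (h :: t)
      · simp only [hp, if_true]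
        have hge := pvGo_ge sub n (List.drop sub.length (h :: t)) (acc + 1)
        constructor
        · intro he; omega
        · intro hno; exact absurd ⟨0, by simpa using (List.isPrefixOf_iff_prefix.mp hp)⟩ hno
      · simp only [Bool.not_eq_true] at hp
        simp only [hp, Bool.false_eq_true, if_false]
        have hp' : ¬ sub <+: (h :: t) := fun c => by
          rw [List.isPrefixOf_iff_prefix.mpr c] at hp; simp at hp
        rw [ih t (by simpa using Nat.le_of_succ_le_succ (by simpa using hl)) acc]
        constructor
        · rintro hno ⟨j, hj⟩
          cases j with
          | zero => exact hp' (by simpa using hj)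
          | succ k => exact hno ⟨k, by simpa using hj⟩
        · intro hno ⟨k, hk⟩
          exact hno ⟨k + 1, by simpa using hk⟩

lemma pvCount_ne_zero_iff (u : List Char) :
    PySem.Chars.count u ['A', 'G', 'C'] ≠ 0 ↔ pvOcc u := by
  have h := pvGo_eq_acc_iff ['A', 'G', 'C'] (by simp) u.length u le_rfl 0
  show (if (['A', 'G', 'C'] : List Char).isEmpty then u.length + 1
        else PySem.Chars.count.go ['A', 'G', 'C'] u.length u 0) ≠ 0 ↔ _
  simp only [List.isEmpty_cons, Bool.false_eq_true, if_false]
  rw [Ne, h, not_not]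
  exact (exists_congr (fun j => pvOccAt_iff_prefix_drop u j)).symm

lemma pvSwapA_length (u : List Char) (i : Nat) : (pvSwapA u i).length = u.length := by
  simp [pvSwapA]

lemma pvWinGetD (x : List Char) (lo m k : Nat) (hk : k < ((x.drop lo).take m).length) :
    ((x.drop lo).take m).getD k ' ' = x.getD (lo + k) ' ' := by
  have hk' : k < m ∧ lo + k < x.length := by
    simp [List.length_take, List.length_drop] at hk; omega
  rw [List.getD_eq_getElem _ _ hk, List.getElem_take, List.getElem_drop,
      List.getD_eq_getElem _ _ hk'.2]

lemma pvSwapA_getD (u : List Char) (i : Nat) (m : Nat) (hm : m < u.length) :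
    (pvSwapA u i).getD m ' ' =
      if i - 1 = m then u.getD i ' '
      else if i = m then u.getD (i - 1) ' '
      else u.getD m ' ' := by
  have hm1 : m < (pvSwapA u i).length := by rw [pvSwapA_length]; exact hm
  rw [List.getD_eq_getElem _ _ hm1]
  simp only [pvSwapA, List.getElem_set]
  split_ifs with h1 h2
  · rfl
  · rfl
  · rw [List.getD_eq_getElem _ _ hm]

-- the window B builds from u equals the corresponding slice of A's swapped string
lemma pvWindow_eq_slice_swap (u : List Char) (i : Nat) (h1 : 1 ≤ i) (h2 : i < u.length) :
    (let lo := i - 3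
     let w0 := (u.drop lo).take (i + 3 - lo)
     let j := i - lo
     (w0.set j (w0.getD (j - 1) ' ')).set (j - 1) (w0.getD j ' '))
    = ((pvSwapA u i).drop (i - 3)).take (i + 3 - (i - 3)) := by
  simp only
  set lo := i - 3 with hlo
  set m := i + 3 - lo with hm
  set w0 := (u.drop lo).take m with hw0
  have hlen : w0.length = min m (u.length - lo) := by
    simp [hw0, List.length_take, List.length_drop]
  have hjlt : i - lo < w0.length := by rw [hlen]; omega
  have e1 : w0.getD (i - lo) ' ' = u.getD i ' ' := by
    rw [hw0, pvWinGetD _ _ _ _ hjlt]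
    congr 1; omega
  have e2 : w0.getD (i - lo - 1) ' ' = u.getD (i - 1) ' ' := by
    rw [hw0, pvWinGetD _ _ _ _ (by rw [← hw0, hlen]; omega : i - lo - 1 < ((u.drop lo).take m).length)]
    congr 1; omega
  rw [pvSwapA, List.drop_set, if_neg (by omega : ¬ i - 1 < lo),
      List.drop_set, if_neg (by omega : ¬ i < lo),
      List.take_set, List.take_set]
  rw [e1, e2, ← hw0]
  congr 1
  omega

-- locality: if u itself has no 'AGC', the swapped string has one iff its window does
lemma pvLocality (u : List Char) (i : Nat) (h1 : 1 ≤ i) (h2 : i < u.length)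
    (hu : ¬ pvOcc u) :
    (pvOcc (pvSwapA u i) ↔ pvOcc (((pvSwapA u i).drop (i - 3)).take (i + 3 - (i - 3)))) := by
  set lo := i - 3 with hlo
  set m := i + 3 - lo with hm
  set v := pvSwapA u i with hv
  have hlenv : v.length = u.length := pvSwapA_length u i
  have hlenw : ((v.drop lo).take m).length = min m (u.length - lo) := by
    simp [List.length_take, List.length_drop, hlenv]
  constructor
  · rintro ⟨jj, hjlen, hA, hG, hC⟩
    have hjlen' : jj + 2 < u.length := by rw [hlenv] at hjlen; exact hjlen
    by_cases htouch : jj ≤ i ∧ i ≤ jj + 3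
    · refine ⟨jj - lo, by rw [hlenw]; omega, ?_, ?_, ?_⟩
      · rw [pvWinGetD _ _ _ _ (by rw [hlenw]; omega), (by omega : lo + (jj - lo) = jj)]; exact hA
      · rw [pvWinGetD _ _ _ _ (by rw [hlenw]; omega), (by omega : lo + (jj - lo + 1) = jj + 1)]; exact hG
      · rw [pvWinGetD _ _ _ _ (by rw [hlenw]; omega), (by omega : lo + (jj - lo + 2) = jj + 2)]; exact hC
    · exfalso
      apply hu
      refine ⟨jj, hjlen', ?_, ?_, ?_⟩
      · rw [← hA, hv, pvSwapA_getD u i jj (by omega), if_neg (by omega), if_neg (by omega)]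
      · rw [← hG, hv, pvSwapA_getD u i (jj + 1) (by omega), if_neg (by omega), if_neg (by omega)]
      · rw [← hC, hv, pvSwapA_getD u i (jj + 2) (by omega), if_neg (by omega), if_neg (by omega)]
  · rintro ⟨k, hk, hA, hG, hC⟩
    have hk' : k + 2 < min m (u.length - lo) := by rw [hlenw] at hk; exact hk
    refine ⟨lo + k, by rw [hlenv]; omega, ?_, ?_, ?_⟩
    · rw [pvWinGetD _ _ _ _ (by rw [hlenw]; omega)] at hA; exact hA
    · rw [(by omega : lo + k + 1 = lo + (k + 1))]
      rw [pvWinGetD _ _ _ _ (by rw [hlenw]; omega)] at hG; exact hG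
    · rw [(by omega : lo + k + 2 = lo + (k + 2))]
      rw [pvWinGetD _ _ _ _ (by rw [hlenw]; omega)] at hC; exact hC

lemma pvALoop_eq_all (u : List Char) (is : List Nat) :
    pvALoop u is =
      is.all (fun i =>
        PySem.Chars.count (if 1 ≤ i then pvSwapA u i else u) ['A', 'G', 'C'] == 0) := by
  induction is with
  | nil => rfl
  | cons i rest ih =>
    show (if PySem.Chars.count (if 1 ≤ i then pvSwapA u i else u) ['A', 'G', 'C'] ≠ 0
          then false else pvALoop u rest) = _
    rw [List.all_cons, ih]
    by_cases hc : PySem.Chars.count (if 1 ≤ i then pvSwapA u i else u) ['A', 'G', 'C'] = 0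
    · simp [hc]
    · simp [hc]

lemma pvBLoop_eq_all (u : List Char) (is : List Nat) :
    pvBLoop u is =
      is.all (fun i =>
        !PySem.Chars.isIn ['A', 'G', 'C']
          ((((u.drop (i - 3)).take (i + 3 - (i - 3))).set (i - (i - 3))
              (((u.drop (i - 3)).take (i + 3 - (i - 3))).getD (i - (i - 3) - 1) ' ')).set
            (i - (i - 3) - 1) (((u.drop (i - 3)).take (i + 3 - (i - 3))).getD (i - (i - 3)) ' '))) := by
  induction is with
  | nil => rfl
  | cons i rest ih =>
    show (if PySem.Chars.isIn ['A', 'G', 'C'] _ then false else pvBLoop u rest) = _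
    rw [List.all_cons, ih]
    by_cases hc : PySem.Chars.isIn ['A', 'G', 'C']
        ((((u.drop (i - 3)).take (i + 3 - (i - 3))).set (i - (i - 3))
            (((u.drop (i - 3)).take (i + 3 - (i - 3))).getD (i - (i - 3) - 1) ' ')).set
          (i - (i - 3) - 1) (((u.drop (i - 3)).take (i + 3 - (i - 3))).getD (i - (i - 3)) ' ')) = true
    · rw [hc]; simp
    · simp only [Bool.not_eq_true] at hc
      rw [hc]; simp

lemma pvAll_congr_mem {l : List Nat} {p q : Nat → Bool} (h : ∀ i ∈ l, p i = q i) :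
    l.all p = l.all q := by
  induction l with
  | nil => rfl
  | cons a t ih =>
    rw [List.all_cons, List.all_cons, h a (by simp), ih (fun i hi => h i (by simp [hi]))]

lemma pvRange_split (n : Nat) (hn : 0 < n) :
    List.range n = 0 :: List.range' 1 (n - 1) := by
  rw [List.range_eq_range']
  cases n with
  | zero => omega
  | succ k => rw [List.range'_succ]; simp

-- the heart of the proof: the two loops agree on every string
lemma pvMain (u : List Char) :
    pvALoop u (List.range u.length) =
      (if PySem.Chars.isIn ['A', 'G', 'C'] u then false
       else pvBLoop u (List.range' 1 (u.length - 1))) := by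
  by_cases hu : pvOcc u
  · rw [if_pos ((pvOcc_iff_isIn u).mp hu)]
    obtain ⟨j, hj⟩ := hu
    have hlen : 0 < u.length := by have := hj.1; omega
    rw [pvRange_split u.length hlen]
    have hc : PySem.Chars.count u ['A', 'G', 'C'] ≠ 0 :=
      (pvCount_ne_zero_iff u).mpr ⟨j, hj⟩
    show (if PySem.Chars.count (if (1 : Nat) ≤ 0 then pvSwapA u 0 else u) ['A', 'G', 'C'] ≠ 0
          then false else pvALoop u (List.range' 1 (u.length - 1))) = false
    simp [hc]
  · rw [if_neg (by rw [← pvOcc_iff_isIn]; exact hu)]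
    rcases Nat.eq_zero_or_pos u.length with h0 | hpos
    · rw [h0]; rfl
    · rw [pvRange_split u.length hpos]
      have hc : PySem.Chars.count u ['A', 'G', 'C'] = 0 := by
        by_contra hcne; exact hu ((pvCount_ne_zero_iff u).mp hcne)
    -- first iteration of A (i = 0, no swap) passes
      show (if PySem.Chars.count (if (1 : Nat) ≤ 0 then pvSwapA u 0 else u) ['A', 'G', 'C'] ≠ 0
            then false else pvALoop u (List.range' 1 (u.length - 1))) = _
      simp only [show ¬ (1 : Nat) ≤ 0 by omega, hc, ne_eq, not_true_eq_false,
        not_false_eq_true, if_neg]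
      rw [pvALoop_eq_all, pvBLoop_eq_all]
      apply pvAll_congr_mem
      intro i hi
      have hi' : 1 ≤ i ∧ i < u.length := by
        rw [List.mem_range'_1] at hi; omega
      simp only [if_pos hi'.1]
      have key : PySem.Chars.count (pvSwapA u i) ['A', 'G', 'C'] ≠ 0 ↔
          PySem.Chars.isIn ['A', 'G', 'C']
            ((((u.drop (i - 3)).take (i + 3 - (i - 3))).set (i - (i - 3))
                (((u.drop (i - 3)).take (i + 3 - (i - 3))).getD (i - (i - 3) - 1) ' ')).set
              (i - (i - 3) - 1)
              (((u.drop (i - 3)).take (i + 3 - (i - 3))).getD (i - (i - 3)) ' ')) = true := by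
        rw [pvCount_ne_zero_iff, pvWindow_eq_slice_swap u i hi'.1 hi'.2]
        rw [pvLocality u i hi'.1 hi'.2 hu]
        exact pvOcc_iff_isIn _
      rw [Bool.eq_iff_iff, beq_iff_eq, Bool.not_eq_true', Bool.eq_false_iff]
      constructor
      · exact fun h hh => (key.mpr hh) h
      · exact fun h => by_contra fun hcne => h (key.mp hcne)

-- ===== VERDICT (by name: the statement is the Claim_ definition above) =====
theorem isOK_spec : Claim_equal_isOK := by
  intro last3 s _
  unfold Spec_isOK isOK isOK_alt
  exact pvMain (last3.toList ++ s.toList)
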